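-- pv_equiv track=rewrite | github.com/pjjefferies/python_practice | square_in_rectangle.py | sqInRect
-- ===== SOURCE A (Python) =====
-- def sqInRect(length, width):
--     # your code
--     if length == width:
--         return None
--     if width > length:
--         length, width = width, length
--     solution = []
--     while width > 0:
--         solution.append(width)
--         length -= width
--         if width > length:
--             length, width = width, length
--     return solution
-- ===== SOURCE B (Python) =====
-- def sqInRect(length, width):
--     if length == width:
--         return None
--     if width > length:
--         length, width = width, length
--     solution = []
--     while width > 0:
--         q, r = divmod(length, width)
--         solution.extend([width] * q)
--         length, width = width, r
--     return solution
-- ===== Notes on version B (the rewrite author's own statement) =====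
-- stated objective: faster
-- what changed: Replaces the one-subtraction-per-iteration loop with the division form of the Euclidean decomposition: divmod yields the whole run of equal squares at once and carries the remainder forward.
import Mathlib
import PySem

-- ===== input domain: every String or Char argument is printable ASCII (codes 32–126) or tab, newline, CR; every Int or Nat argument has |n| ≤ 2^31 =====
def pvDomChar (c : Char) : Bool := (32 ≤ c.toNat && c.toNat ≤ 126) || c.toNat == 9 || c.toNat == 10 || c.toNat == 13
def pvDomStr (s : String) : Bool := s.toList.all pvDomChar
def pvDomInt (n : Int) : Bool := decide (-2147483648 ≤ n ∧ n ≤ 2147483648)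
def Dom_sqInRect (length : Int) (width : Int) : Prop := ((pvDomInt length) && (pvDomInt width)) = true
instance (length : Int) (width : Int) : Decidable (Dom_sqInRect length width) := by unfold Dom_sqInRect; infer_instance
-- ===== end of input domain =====

-- B replaces A's one-subtraction-per-iteration Euclidean loop by the divmod form that
-- appends each run of equal squares at once (fewer iterations); return values are equal.

-- ===== PORT A =====
-- A's while loop: append width, length -= width, swap if width > length.
def sqInRectLoopA (length : Int) (width : Int) (solution : List Int) : List Int :=
  if 0 < width then
    let solution' := solution ++ [width]
    let length' := length - width
    if width > length' then
      sqInRectLoopA width length' solution'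
    else
      sqInRectLoopA length' width solution'
  else solution
termination_by (width.toNat, length.toNat)
decreasing_by
  · exact Prod.Lex.left _ _ (by omega)
  · exact Prod.Lex.right _ (by omega)

def sqInRect (length : Int) (width : Int) : Option (List Int) :=
  if length == width then none
  else
    let p := if width > length then (width, length) else (length, width)
    some (sqInRectLoopA p.1 p.2 [])

-- ===== PORT B =====
-- B's while loop: q, r = divmod(length, width); extend by [width]*q; length, width = width, r.
def sqInRectLoopB (length : Int) (width : Int) (solution : List Int) : List Int :=
  if h : 0 < width then
    let q := PySem.Int.floordiv length width
    let r := PySem.Int.mod length width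
    sqInRectLoopB width r (solution ++ List.replicate q.toNat width)
  else solution
termination_by width.toNat
decreasing_by
  have h1 : PySem.Int.mod length width = length % width :=
    PySem.Int.mod_eq_emod_of_pos h
  have h2 : length % width < width := Int.emod_lt_of_pos _ h
  omega

def sqInRect_alt (length : Int) (width : Int) : Option (List Int) :=
  if length == width then none
  else
    let p := if width > length then (width, length) else (length, width)
    some (sqInRectLoopB p.1 p.2 [])

-- ===== PRECONDITION & SPEC =====
def Spec_sqInRect (length : Int) (width : Int) (out : Option (List Int)) : Prop := out = sqInRect_alt length width
instance (length : Int) (width : Int) (out : Option (List Int)) : Decidable (Spec_sqInRect length width out) := by unfold Spec_sqInRect; infer_instance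

-- ===== CLAIM (what is proved, stated in full; the proofs are below) =====
def Claim_equal_sqInRect : Prop := ∀ (length : Int) (width : Int), Dom_sqInRect length width → Spec_sqInRect length width (sqInRect length width)

-- ===== LEMMAS AND PROOFS =====

-- One divmod chunk of B corresponds to (length / width) subtraction steps of A.
theorem loopA_chunk (length width : Int) (sol : List Int)
    (hw : 0 < width) (hlw : width ≤ length) :
    sqInRectLoopA length width sol =
      sqInRectLoopA width (length % width) (sol ++ List.replicate (length / width).toNat width) := by
  induction hn : length.toNat using Nat.strong_induction_on generalizing length sol with
  | _ n ih =>
  subst hn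
  rw [sqInRectLoopA]
  simp only [if_pos hw]
  by_cases hlt : width > length - width
  · -- last subtraction of the run: length < 2*width, so q = 1, r = length - width
    rw [if_pos hlt]
    have huniq := (Int.ediv_emod_unique'' (a := length) (b := width)
      (r := length - width) (q := 1) (by omega)).mpr
      ⟨by ring, by omega, by rw [abs_of_pos hw]; omega⟩
    rw [huniq.1, huniq.2]
    simp
  · -- length ≥ 2*width: one subtraction, then the IH on length - width
    rw [if_neg hlt]
    have hstep := ih (length - width).toNat (by omega) (length - width) (sol ++ [width])
      (by omega) rfl
    rw [hstep]
    have hkey := Int.emod_add_mul_ediv length width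
    have huniq := (Int.ediv_emod_unique'' (a := length - width) (b := width)
      (r := length % width) (q := length / width - 1) (by omega)).mpr
      ⟨by linear_combination hkey, Int.emod_nonneg _ (by omega),
       by rw [abs_of_pos hw]; exact Int.emod_lt_of_pos _ hw⟩
    have hqpos : 1 ≤ length / width := by
      have h1 : (1 : Int) * width ≤ length := by omega
      exact (Int.le_ediv_iff_mul_le hw).mpr h1
    rw [huniq.2, huniq.1]
    have : List.replicate (length / width).toNat width =
        width :: List.replicate (length / width - 1).toNat width := by
      have : (length / width).toNat = ((length / width - 1).toNat) + 1 := by omega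
      rw [this, List.replicate_succ]
    rw [this]
    simp

-- The two loops agree from any state with 0 < width ≤ length.
theorem loop_eq (width length : Int) (sol : List Int)
    (hw : 0 < width) (hlw : width ≤ length) :
    sqInRectLoopA length width sol = sqInRectLoopB length width sol := by
  induction hn : width.toNat using Nat.strong_induction_on generalizing width length sol with
  | _ n ih =>
  subst hn
  rw [sqInRectLoopB]
  simp only [dif_pos hw]
  rw [PySem.Int.mod_eq_emod_of_pos hw, PySem.Int.floordiv_eq_ediv_of_pos hw]
  rw [loopA_chunk length width sol hw hlw]
  set r := length % width with hrdef
  have hr0 : 0 ≤ r := Int.emod_nonneg _ (by omega)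
  have hrw : r < width := Int.emod_lt_of_pos _ hw
  by_cases hr : 0 < r
  · exact ih r.toNat (by omega) r width _ hr (by omega) rfl
  · have : r = 0 := by omega
    rw [this, sqInRectLoopA, sqInRectLoopB]
    simp

-- ===== VERDICT (by name: the statement is the Claim_ definition above) =====
theorem sqInRect_spec : Claim_equal_sqInRect := by
  intro length width _
  unfold Spec_sqInRect sqInRect sqInRect_alt
  by_cases heq : length == width
  · simp [heq]
  · simp only [heq, Bool.false_eq_true, if_false]
    have hne : length ≠ width := by simpa using heq
    by_cases hswap : width > length
    · simp only [if_pos hswap]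
      by_cases hw : 0 < length
      · rw [loop_eq length width [] hw (by omega)]
      · rw [sqInRectLoopA, sqInRectLoopB]; simp [hw]
    · simp only [if_neg hswap]
      by_cases hw : 0 < width
      · rw [loop_eq width length [] hw (by omega)]
      · rw [sqInRectLoopA, sqInRectLoopB]; simp [hw]
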